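-- pv_equiv track=rewrite | github.com/danieljnason/36-650 | Homeworks/HW6/q4/q4.py | delete_keys
-- ===== SOURCE A (Python) =====
-- def delete_keys(rem_list, dictionary):
--     if not isinstance(rem_list, list):
--         raise TypeError("Incorrect type, please input a list as the first argument.")
--     if not isinstance(dictionary, dict):
--         raise TypeError("Incorrect type, please input a dictionary as the second argument.")
--     for key in rem_list:
--         if key in dictionary:
--             dictionary.pop(key)
--     return dictionary
-- ===== SOURCE B (Python) =====
-- def delete_keys(rem_list, dictionary):
--     if not isinstance(rem_list, list):
--         raise TypeError("Incorrect type, please input a list as the first argument.")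
--     if not isinstance(dictionary, dict):
--         raise TypeError("Incorrect type, please input a dictionary as the second argument.")
--     rem = set(rem_list)
--     return {k: v for k, v in dictionary.items() if k not in rem}
-- ===== Notes on version B (the rewrite author's own statement) =====
-- stated objective: simpler
-- what changed: B builds the result in one dict comprehension keeping entries whose key is not in set(rem_list), traversing the dictionary instead of A's in-place deletion loop driven by rem_list; return values agree, but A mutates its dictionary argument while B returns a fresh dict.
import Mathlib
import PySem

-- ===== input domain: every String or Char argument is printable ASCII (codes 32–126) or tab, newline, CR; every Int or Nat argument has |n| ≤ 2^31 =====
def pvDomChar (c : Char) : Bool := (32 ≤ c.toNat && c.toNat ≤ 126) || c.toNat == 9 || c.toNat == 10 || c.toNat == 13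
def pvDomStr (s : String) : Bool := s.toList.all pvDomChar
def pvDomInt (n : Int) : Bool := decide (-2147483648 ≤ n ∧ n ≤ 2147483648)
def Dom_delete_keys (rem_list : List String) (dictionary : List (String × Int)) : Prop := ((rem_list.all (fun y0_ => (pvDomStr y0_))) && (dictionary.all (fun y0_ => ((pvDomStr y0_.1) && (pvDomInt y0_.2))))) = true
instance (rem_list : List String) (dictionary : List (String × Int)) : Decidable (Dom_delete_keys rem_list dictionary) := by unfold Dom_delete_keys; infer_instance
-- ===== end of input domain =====

-- B filters the dictionary once by membership in rem_list instead of A's deletion loop driven by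
-- rem_list ("simpler"); equivalence is about the RETURN value only: Python A mutates its dictionary
-- argument in place, B leaves it untouched.

-- ===== PORT A =====
-- for key in rem_list: if key in dictionary: dictionary.pop(key)   (pop removes the key's entry)
def delete_keys (rem_list : List String) (dictionary : List (String × Int)) : List (String × Int) :=
  rem_list.foldl
    (fun d key => if d.any (fun kv => kv.1 == key) then d.filter (fun kv => kv.1 != key) else d)
    dictionary

-- ===== PORT B =====
-- rem = set(rem_list); {k: v for k, v in dictionary.items() if k not in rem}
def delete_keys_alt (rem_list : List String) (dictionary : List (String × Int)) : List (String × Int) :=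
  let rem : PySem.Set String := PySem.Set.ofList rem_list
  dictionary.filter (fun kv => !(PySem.Set.contains rem kv.1))

-- ===== PRECONDITION & SPEC =====
def Spec_delete_keys (rem_list : List String) (dictionary : List (String × Int)) (out : List (String × Int)) : Prop := out = delete_keys_alt rem_list dictionary
instance (rem_list : List String) (dictionary : List (String × Int)) (out : List (String × Int)) : Decidable (Spec_delete_keys rem_list dictionary out) := by unfold Spec_delete_keys; infer_instance

-- ===== CLAIM (what is proved, stated in full; the proofs are below) =====
def Claim_equal_delete_keys : Prop := ∀ (rem_list : List String) (dictionary : List (String × Int)), Dom_delete_keys rem_list dictionary → Spec_delete_keys rem_list dictionary (delete_keys rem_list dictionary)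

-- ===== LEMMAS AND PROOFS =====

-- One step of A's loop is unconditionally a filter: when no entry matches the key,
-- the filter keeps everything, so the 'if key in dictionary' guard collapses.
theorem delete_keys_step (d : List (String × Int)) (key : String) :
    (if d.any (fun kv => kv.1 == key) then d.filter (fun kv => kv.1 != key) else d)
      = d.filter (fun kv => kv.1 != key) := by
  by_cases h : d.any (fun kv => kv.1 == key) = true
  · simp [h]
  · have h' : ∀ kv ∈ d, (kv.1 != key) = true := by
      intro kv hkv
      simp only [List.any_eq_true, not_exists, not_and] at h
      simpa [bne] using h kv hkv
    simp [h, List.filter_eq_self.mpr h']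

theorem foldl_filter_eq (ks : List String) (d : List (String × Int)) :
    ks.foldl (fun d key => d.filter (fun kv => kv.1 != key)) d
      = d.filter (fun kv => !ks.contains kv.1) := by
  induction ks generalizing d with
  | nil => simp
  | cons k ks ih =>
    rw [List.foldl_cons, ih, List.filter_filter]
    apply List.filter_congr
    intro kv _
    simp only [List.contains_cons]
    cases hk : kv.1 == k
    · simp only [beq_eq_false_iff_ne, ne_eq] at hk
      simp [hk, Bool.and_comm]
    · simp only [beq_iff_eq] at hk
      simp [hk]

-- ===== VERDICT (by name: the statement is the Claim_ definition above) =====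
theorem delete_keys_spec : Claim_equal_delete_keys := by
  intro rem_list dictionary _
  unfold Spec_delete_keys delete_keys_alt delete_keys
  simp only [delete_keys_step, PySem.Set.contains_eq_listContains]
  rw [foldl_filter_eq]
  apply List.filter_congr
  intro kv _
  have : kv.1 ∈ PySem.Set.ofList rem_list ↔ kv.1 ∈ rem_list := PySem.Set.mem_ofList rem_list kv.1
  simp only [List.contains_eq_mem] at *
  simp [this]
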